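-- pv_equiv track=rewrite | github.com/pypi-data/pypi-mirror-376 | packages/petrifyml/petrifyml-2.0.0.tar.gz/petrifyml-2.0.0/petrifyml/mvautils_common_utils.py | find_right_child
-- ===== SOURCE A (Python) =====
-- def find_right_child(start_idx, vars_)->int:
--     """
--     Finds the index of the right child node in a depth-first flattened tree.
--     Assumes left child is at start_idx + 1, and all left children are expanded recursively.
--     """
--     count = 0
--     idx = start_idx + 1
--     while idx < len(vars_):
--         if vars_[idx] == -1:
--             if count == 0:
--                 return idx + 1
--             else:
--                 count -= 1
--         else:
--             count += 1
--         idx += 1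
--     raise RuntimeError(f"Failed to find right child from node {start_idx}.")
-- ===== SOURCE B (Python) =====
-- def find_right_child(start_idx, vars_) -> int:
--     """
--     Finds the index of the right child node in a depth-first flattened tree
--     by recursively skipping complete subtrees: skip(i) returns the index just
--     past the subtree rooted at i (a leaf is marked by -1); the right child
--     starts right after the left subtree, i.e. at skip(start_idx + 1).
--     """
--     n = len(vars_)
--
--     def skip(idx):
--         if idx >= n:
--             raise RuntimeError(f"Failed to find right child from node {start_idx}.")
--         if vars_[idx] == -1:
--             return idx + 1
--         return skip(skip(idx + 1))
--
--     return skip(start_idx + 1)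
-- ===== Notes on version B (the rewrite author's own statement) =====
-- stated objective: alternative
-- what changed: Replaces A's flat scan with a balance counter by a recursive helper skip(idx) that returns the index just past the complete subtree rooted at idx, so the answer is simply skip(start_idx + 1).
import Mathlib
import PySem

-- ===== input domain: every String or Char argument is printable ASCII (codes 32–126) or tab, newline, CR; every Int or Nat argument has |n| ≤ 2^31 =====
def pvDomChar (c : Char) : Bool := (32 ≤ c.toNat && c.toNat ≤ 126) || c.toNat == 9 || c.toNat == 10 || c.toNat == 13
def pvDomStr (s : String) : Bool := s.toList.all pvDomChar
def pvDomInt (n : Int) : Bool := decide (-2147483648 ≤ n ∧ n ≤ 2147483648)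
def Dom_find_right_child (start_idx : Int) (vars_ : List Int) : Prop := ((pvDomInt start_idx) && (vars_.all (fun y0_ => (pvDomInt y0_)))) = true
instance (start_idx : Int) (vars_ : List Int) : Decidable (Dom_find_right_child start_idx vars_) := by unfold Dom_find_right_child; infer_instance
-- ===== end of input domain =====

-- B replaces A's flat counter scan by a recursive subtree-skipping helper (alternative decomposition, same cost).

-- ===== PORT A =====
-- A's while-loop with state (count, idx); `none` = the RuntimeError / IndexError paths.
def pvLoopA (vars_ : List Int) (count idx : Int) : Option Int :=
  if _h : idx < (vars_.length : Int) then
    (PySem.List.pyGet? vars_ idx).bind (fun v =>  -- none = IndexError (idx < -len)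
      if v = -1 then
        if count = 0 then some (idx + 1)
        else pvLoopA vars_ (count - 1) (idx + 1)
      else pvLoopA vars_ (count + 1) (idx + 1))
  else none  -- loop exits: raise RuntimeError
termination_by ((vars_.length : Int) - idx).toNat
decreasing_by all_goals omega

def find_right_child (start_idx : Int) (vars_ : List Int) : Int :=
  (pvLoopA vars_ 0 (start_idx + 1)).getD 0

-- ===== PORT B =====
-- B's recursive skip(idx) = index just past the subtree rooted at idx; fuel only makes the
-- recursion total (2*len+2 always suffices on inputs where skip returns), `none` = raise.
def pvSkipB (vars_ : List Int) : Nat → Int → Option Int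
  | 0, _ => none
  | f + 1, idx =>
    if idx < (vars_.length : Int) then
      (PySem.List.pyGet? vars_ idx).bind (fun v =>  -- none = IndexError
        if v = -1 then some (idx + 1)
        else (pvSkipB vars_ f (idx + 1)).bind (pvSkipB vars_ f))
    else none  -- raise RuntimeError

def find_right_child_alt (start_idx : Int) (vars_ : List Int) : Int :=
  (pvSkipB vars_ (2 * vars_.length + 2) (start_idx + 1)).getD 0

-- ===== PRECONDITION & SPEC =====
-- pvBal vars_ s j = #leaves - #internal nodes among positions s+1 .. j (Python wrap indexing).
def pvBal (vars_ : List Int) (s j : Int) : Int :=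
  ((PySem.List.pyRange (s + 1) (j + 1) 1).map
    (fun i => if PySem.List.pyGetD vars_ i 0 = -1 then (1 : Int) else -1)).sum

-- Pre_ = exactly the inputs where A returns (no IndexError from idx < -len, and the
-- balance of leaves over internal nodes reaches +1 at some scanned position before the end).
def Pre_find_right_child (start_idx : Int) (vars_ : List Int) : Prop :=
  -(vars_.length : Int) ≤ start_idx + 1 ∧
  ∃ j ∈ PySem.List.pyRange (start_idx + 1) (vars_.length : Int) 1, pvBal vars_ start_idx j = 1
instance (start_idx : Int) (vars_ : List Int) : Decidable (Pre_find_right_child start_idx vars_) := by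
  unfold Pre_find_right_child; infer_instance

def pvWitness_find_right_child : Int × List Int := (0, [5, -1, -1])

def Spec_find_right_child (start_idx : Int) (vars_ : List Int) (out : Int) : Prop := out = find_right_child_alt start_idx vars_
instance (start_idx : Int) (vars_ : List Int) (out : Int) : Decidable (Spec_find_right_child start_idx vars_ out) := by unfold Spec_find_right_child; infer_instance

-- ===== CLAIM (what is proved, stated in full; the proofs are below) =====
def Claim_equal_find_right_child : Prop := ∀ (start_idx : Int) (vars_ : List Int), Dom_find_right_child start_idx vars_ → Pre_find_right_child start_idx vars_ → Spec_find_right_child start_idx vars_ (find_right_child start_idx vars_)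

-- ===== LEMMAS AND PROOFS =====

theorem pv_pyGet?_some_range {α : Type} (xs : List α) (i : Int) (v : α)
    (h : PySem.List.pyGet? xs i = some v) : -(xs.length : Int) ≤ i ∧ i < xs.length := by
  by_contra hc
  have hn : PySem.List.pyGet? xs i = none := (PySem.List.pyGet?_eq_none_iff xs i).mpr hc
  rw [hn] at h
  simp at h

-- a returned skip value is past its argument and at most len; the argument is wrap-valid
theorem pvSkipB_some_bounds (vars_ : List Int) :
    ∀ (f : Nat) (idx r : Int), pvSkipB vars_ f idx = some r →
      idx + 1 ≤ r ∧ r ≤ vars_.length ∧ -(vars_.length : Int) ≤ idx := by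
  intro f
  induction f with
  | zero => intro idx r h; simp [pvSkipB] at h
  | succ f ih =>
    intro idx r h
    rw [pvSkipB] at h
    by_cases hlt : idx < (vars_.length : Int)
    · rw [if_pos hlt] at h
      rcases hg : PySem.List.pyGet? vars_ idx with _ | v
      · rw [hg, Option.bind_none] at h
        simp at h
      · rw [hg, Option.bind_some] at h
        have hr := pv_pyGet?_some_range vars_ idx v hg
        by_cases hv : v = -1
        · rw [if_pos hv] at h
          rcases Option.some.inj h with rfl
          exact ⟨le_refl _, by omega, hr.1⟩
        · rw [if_neg hv] at h
          rcases Option.bind_eq_some_iff.mp h with ⟨m, hm, hrest⟩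
          have h1 := ih (idx + 1) m hm
          have h2 := ih m r hrest
          exact ⟨by omega, by omega, hr.1⟩
    · rw [if_neg hlt] at h
      simp at h

-- any two sufficient fuels agree
theorem pvSkipB_stable (vars_ : List Int) :
    ∀ (n : Nat) (idx : Int) (f f' : Nat),
      ((vars_.length : Int) - idx).toNat ≤ n → n < f → n < f' →
      pvSkipB vars_ f idx = pvSkipB vars_ f' idx := by
  intro n
  induction n using Nat.strong_induction_on with
  | _ n ih =>
    intro idx f f' hb hf hf'
    obtain ⟨f1, rfl⟩ : ∃ k, f = k + 1 := ⟨f - 1, by omega⟩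
    obtain ⟨f2, rfl⟩ : ∃ k, f' = k + 1 := ⟨f' - 1, by omega⟩
    rw [pvSkipB, pvSkipB]
    by_cases hlt : idx < (vars_.length : Int)
    · rw [if_pos hlt, if_pos hlt]
      rcases hg : PySem.List.pyGet? vars_ idx with _ | v
      · rfl
      · rw [Option.bind_some, Option.bind_some]
        have hr := pv_pyGet?_some_range vars_ idx v hg
        by_cases hv : v = -1
        · rw [if_pos hv, if_pos hv]
        · rw [if_neg hv, if_neg hv]
          have hn1 : 1 ≤ n := by omega
          have hleft : pvSkipB vars_ f1 (idx + 1) = pvSkipB vars_ f2 (idx + 1) :=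
            ih (n - 1) (by omega) (idx + 1) f1 f2 (by omega) (by omega) (by omega)
          rw [hleft]
          rcases hm : pvSkipB vars_ f2 (idx + 1) with _ | m
          · rfl
          · rw [Option.bind_some, Option.bind_some]
            have hmb := pvSkipB_some_bounds vars_ f2 (idx + 1) m hm
            exact ih (n - 1) (by omega) m f1 f2 (by omega) (by omega) (by omega)
    · rw [if_neg hlt, if_neg hlt]

-- canonical-fuel skip
def pvSk (vars_ : List Int) (idx : Int) : Option Int :=
  pvSkipB vars_ (2 * vars_.length + 2) idx

theorem pvSk_none (vars_ : List Int) (idx : Int) (h : ¬ idx < (vars_.length : Int)) :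
    pvSk vars_ idx = none := by
  show pvSkipB vars_ (2 * vars_.length + 1 + 1) idx = none
  rw [pvSkipB, if_neg h]

theorem pvSk_getNone (vars_ : List Int) (idx : Int)
    (hg : PySem.List.pyGet? vars_ idx = none) : pvSk vars_ idx = none := by
  show pvSkipB vars_ (2 * vars_.length + 1 + 1) idx = none
  rw [pvSkipB]
  by_cases hlt : idx < (vars_.length : Int)
  · rw [if_pos hlt, hg]; rfl
  · rw [if_neg hlt]

theorem pvSk_leaf (vars_ : List Int) (idx : Int) (hlt : idx < (vars_.length : Int))
    (hg : PySem.List.pyGet? vars_ idx = some (-1)) : pvSk vars_ idx = some (idx + 1) := by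
  show pvSkipB vars_ (2 * vars_.length + 1 + 1) idx = some (idx + 1)
  rw [pvSkipB, if_pos hlt, hg, Option.bind_some, if_pos rfl]

theorem pvSk_internal (vars_ : List Int) (idx : Int) (v : Int) (hlt : idx < (vars_.length : Int))
    (hg : PySem.List.pyGet? vars_ idx = some v) (hv : v ≠ -1) :
    pvSk vars_ idx = (pvSk vars_ (idx + 1)).bind (pvSk vars_) := by
  have hr := pv_pyGet?_some_range vars_ idx v hg
  have step : pvSk vars_ idx =
      (pvSkipB vars_ (2 * vars_.length + 1) (idx + 1)).bind (pvSkipB vars_ (2 * vars_.length + 1)) := by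
    show pvSkipB vars_ (2 * vars_.length + 1 + 1) idx = _
    rw [pvSkipB, if_pos hlt, hg, Option.bind_some, if_neg hv]
  rw [step]
  have hleft : pvSkipB vars_ (2 * vars_.length + 1) (idx + 1) = pvSk vars_ (idx + 1) :=
    pvSkipB_stable vars_ (2 * vars_.length) (idx + 1) _ _ (by omega) (by omega) (by omega)
  rw [hleft]
  rcases hm : pvSk vars_ (idx + 1) with _ | m
  · rfl
  · rw [Option.bind_some, Option.bind_some]
    have hmb := pvSkipB_some_bounds vars_ (2 * vars_.length + 2) (idx + 1) m hm
    exact pvSkipB_stable vars_ (2 * vars_.length) m _ _ (by omega) (by omega) (by omega)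

-- chain of c+1 skips
def pvSkN (vars_ : List Int) : Nat → Int → Option Int
  | 0, idx => some idx
  | m + 1, idx => (pvSk vars_ idx).bind (pvSkN vars_ m)

-- A's counter loop with count c is exactly c+1 chained skips
theorem pvLoop_eq_skN (vars_ : List Int) :
    ∀ (n : Nat) (c idx : Int), 0 ≤ c → ((vars_.length : Int) - idx).toNat ≤ n →
      pvLoopA vars_ c idx = pvSkN vars_ (c.toNat + 1) idx := by
  intro n
  induction n with
  | zero =>
    intro c idx _ hb
    have hge : ¬ idx < (vars_.length : Int) := by omega
    rw [pvLoopA, dif_neg hge, pvSkN, pvSk_none vars_ idx hge]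
    rfl
  | succ n ih =>
    intro c idx hc hb
    by_cases hlt : idx < (vars_.length : Int)
    · rw [pvLoopA, dif_pos hlt]
      rcases hg : PySem.List.pyGet? vars_ idx with _ | v
      · rw [pvSkN, pvSk_getNone vars_ idx hg]
        rfl
      · rw [Option.bind_some]
        by_cases hv : v = -1
        · subst hv
          rw [if_pos rfl]
          by_cases hc0 : c = 0
          · subst hc0
            rw [if_pos rfl]
            show _ = (pvSk vars_ idx).bind (pvSkN vars_ ((0 : Int).toNat))
            rw [pvSk_leaf vars_ idx hlt hg, Option.bind_some]
            rfl
          · rw [if_neg hc0, ih (c - 1) (idx + 1) (by omega) (by omega)]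
            show _ = (pvSk vars_ idx).bind (pvSkN vars_ c.toNat)
            rw [pvSk_leaf vars_ idx hlt hg, Option.bind_some]
            congr 1
            omega
        · rw [if_neg hv, ih (c + 1) (idx + 1) (by omega) (by omega)]
          show _ = (pvSk vars_ idx).bind (pvSkN vars_ c.toNat)
          rw [pvSk_internal vars_ idx v hlt hg hv, Option.bind_assoc]
          have hct : (c + 1).toNat + 1 = c.toNat + 1 + 1 := by omega
          rw [hct]
          show (pvSk vars_ (idx + 1)).bind (pvSkN vars_ (c.toNat + 1)) = _
          congr 1
    · rw [pvLoopA, dif_neg hlt, pvSkN, pvSk_none vars_ idx hlt]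
      rfl

-- ===== VERDICT (by name: the statement is the Claim_ definition above) =====
theorem find_right_child_spec : Claim_equal_find_right_child := by
  intro start_idx vars_ _ _
  unfold Spec_find_right_child find_right_child find_right_child_alt
  rw [pvLoop_eq_skN vars_ ((vars_.length : Int) - (start_idx + 1)).toNat 0 (start_idx + 1)
        (by omega) (by omega)]
  show (((pvSk vars_ (start_idx + 1)).bind (pvSkN vars_ 0)).getD 0) = _
  have : (pvSk vars_ (start_idx + 1)).bind (pvSkN vars_ 0) = pvSk vars_ (start_idx + 1) := by
    rcases pvSk vars_ (start_idx + 1) with _ | r <;> rfl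
  rw [this]
  rfl
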